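-- pv_equiv track=rewrite | github.com/paiml/depyler | examples/hard_dutch_auction.py | dutch_auction_price
-- ===== SOURCE A (Python) =====
-- def dutch_auction_price(start_price: int, decrement: int, bids: list[int]) -> int:
--     """Simulate Dutch auction: price drops until a bid matches or exceeds it."""
--     price: int = start_price
--     while price > 0:
--         i: int = 0
--         while i < len(bids):
--             if bids[i] >= price:
--                 return price
--             i = i + 1
--         price = price - decrement
--     return 0
-- ===== SOURCE B (Python) =====
-- def dutch_auction_price(start_price: int, decrement: int, bids: list[int]) -> int:
--     """Closed form: the highest bid decides the clearing price directly."""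
--     if start_price <= 0:
--         return 0
--     m = max(bids) if bids else 0
--     if m >= start_price:
--         return start_price
--     if m <= 0:
--         return 0
--     # first price in start_price, start_price-decrement, ... that is <= m
--     k = -((m - start_price) // decrement)  # ceil((start_price - m) / decrement)
--     price = start_price - k * decrement
--     return price if price > 0 else 0
-- ===== Notes on version B (the rewrite author's own statement) =====
-- stated objective: faster
-- what changed: Replaces the price-dropping simulation loop with closed-form ceiling-division arithmetic on the maximum bid.
-- outside the precondition, e.g. on dutch_auction_price(5, 0, [1]): A does not finish within the time limit, B raises ZeroDivisionError
import Mathlib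
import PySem

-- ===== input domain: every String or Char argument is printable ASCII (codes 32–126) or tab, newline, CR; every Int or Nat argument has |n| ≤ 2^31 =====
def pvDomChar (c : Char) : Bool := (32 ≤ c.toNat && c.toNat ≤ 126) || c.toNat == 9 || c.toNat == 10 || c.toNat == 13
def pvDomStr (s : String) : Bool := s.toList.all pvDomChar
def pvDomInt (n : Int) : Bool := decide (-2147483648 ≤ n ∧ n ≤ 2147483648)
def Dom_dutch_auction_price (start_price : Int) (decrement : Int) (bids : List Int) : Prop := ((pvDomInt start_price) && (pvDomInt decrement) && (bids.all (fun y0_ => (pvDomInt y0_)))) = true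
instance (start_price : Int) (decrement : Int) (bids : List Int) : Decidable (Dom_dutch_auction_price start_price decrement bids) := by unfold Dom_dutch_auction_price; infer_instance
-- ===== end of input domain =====

-- B replaces A's price-dropping simulation by closed-form ceiling-division arithmetic on the maximum bid (objective: faster).

-- ===== PORT A =====
-- inner while loop of A: scan bids left to right, True iff some bid ≥ price
def pvAnyGE (bids : List Int) (price : Int) : Bool :=
  match bids with
  | [] => false
  | b :: rest => if b ≥ price then true else pvAnyGE rest price

-- outer while loop of A, with fuel making the recursion structural; under
-- Pre_ the fuel start_price.toNat + 1 is never exhausted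
def pvALoop (decrement : Int) (bids : List Int) : Nat → Int → Int
  | 0, _ => 0
  | Nat.succ fuel, price =>
    if price > 0 then
      if pvAnyGE bids price then price
      else pvALoop decrement bids fuel (price - decrement)
    else 0

def dutch_auction_price (start_price : Int) (decrement : Int) (bids : List Int) : Int :=
  pvALoop decrement bids (start_price.toNat + 1) start_price

-- ===== PORT B =====
def dutch_auction_price_alt (start_price : Int) (decrement : Int) (bids : List Int) : Int :=
  if start_price ≤ 0 then 0
  else
    let m : Int := (PySem.List.max? bids (fun x => x)).getD 0
    if m ≥ start_price then start_price
    else if m ≤ 0 then 0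
    else
      let k : Int := -(PySem.Int.floordiv (m - start_price) decrement)
      let price : Int := start_price - k * decrement
      if price > 0 then price else 0

-- ===== PRECONDITION & SPEC =====
-- Pre_ excludes exactly the inputs on which A's while loop never terminates:
-- decrement ≤ 0 with a positive start price no bid ever reaches.
def Pre_dutch_auction_price (start_price : Int) (decrement : Int) (bids : List Int) : Prop :=
  start_price ≤ 0 ∨ 0 < decrement ∨ ∃ b ∈ bids, start_price ≤ b
instance (start_price : Int) (decrement : Int) (bids : List Int) : Decidable (Pre_dutch_auction_price start_price decrement bids) := by unfold Pre_dutch_auction_price; infer_instance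

def pvWitness_dutch_auction_price : Int × Int × List Int := (10, 3, [4, 7])

def Spec_dutch_auction_price (start_price : Int) (decrement : Int) (bids : List Int) (out : Int) : Prop := out = dutch_auction_price_alt start_price decrement bids
instance (start_price : Int) (decrement : Int) (bids : List Int) (out : Int) : Decidable (Spec_dutch_auction_price start_price decrement bids out) := by unfold Spec_dutch_auction_price; infer_instance

-- ===== CLAIM (what is proved, stated in full; the proofs are below) =====
def Claim_equal_dutch_auction_price : Prop := ∀ (start_price : Int) (decrement : Int) (bids : List Int), Dom_dutch_auction_price start_price decrement bids → Pre_dutch_auction_price start_price decrement bids → Spec_dutch_auction_price start_price decrement bids (dutch_auction_price start_price decrement bids)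

-- ===== LEMMAS AND PROOFS =====

theorem pvAnyGE_iff (bids : List Int) (p : Int) :
    pvAnyGE bids p = true ↔ ∃ b ∈ bids, p ≤ b := by
  induction bids with
  | nil => simp [pvAnyGE]
  | cons b rest ih =>
    simp only [pvAnyGE]
    by_cases h : b ≥ p <;> simp [h, ih]

-- the closed form that both the loop (for any admissible price) and B compute
def pvClosed (decrement : Int) (m price : Int) : Int :=
  if price ≤ 0 then 0
  else if m ≥ price then price
  else if m ≤ 0 then 0
  else
    let k : Int := -(PySem.Int.floordiv (m - price) decrement)
    let p' : Int := price - k * decrement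
    if p' > 0 then p' else 0

theorem pvClosed_step (d : Int) (hd : 0 < d) (m price : Int)
    (hpos : 0 < price) (hmp : m < price) :
    pvClosed d m (price - d) = pvClosed d m price := by
  by_cases hm0 : m ≤ 0
  · have hL : pvClosed d m (price - d) = 0 := by
      simp only [pvClosed]; split_ifs <;> omega
    have hR : pvClosed d m price = 0 := by
      simp only [pvClosed]; split_ifs <;> omega
    rw [hL, hR]
  · have hm0' : 0 < m := lt_of_not_ge hm0
    set k : Int := -(PySem.Int.floordiv (m - price) d) with hkdef
    have hk : (k - 1) * d < price - m ∧ price - m ≤ k * d := by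
      have h := (PySem.Int.neg_floordiv_neg_eq_iff_of_pos
        (a := price - m) (b := d) (q := k) hd)
      have e : -(PySem.Int.floordiv (-(price - m)) d) = k := by
        rw [show -(price - m) = m - price by ring, ← hkdef]
      exact h.1 e
    have hkpos : 0 < k := by
      by_contra h
      have : k * d ≤ 0 := mul_nonpos_of_nonpos_of_nonneg (le_of_not_gt h) (le_of_lt hd)
      omega
    by_cases h2 : price - d ≤ 0
    · have hk1 : k = 1 := by
        have h1 : (k - 1) * d < 1 * d := by
          calc (k - 1) * d < price - m := hk.1
          _ ≤ d := by omega
          _ = 1 * d := by ring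
        have := lt_of_mul_lt_mul_right h1 (le_of_lt hd)
        omega
      have hL : pvClosed d m (price - d) = 0 := by
        simp only [pvClosed]; rw [if_pos h2]
      have hkd : price - k * d ≤ 0 := by rw [hk1]; omega
      have hR : pvClosed d m price = 0 := by
        simp only [pvClosed]
        rw [← hkdef, if_neg (by omega), if_neg (by omega), if_neg hm0, if_neg (by omega)]
      rw [hL, hR]
    · by_cases h3 : m ≥ price - d
      · have hk1 : k = 1 := by
          have h1 : (k - 1) * d < 1 * d := by
            calc (k - 1) * d < price - m := hk.1
            _ ≤ d := by omega
            _ = 1 * d := by ring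
          have := lt_of_mul_lt_mul_right h1 (le_of_lt hd)
          omega
        have hL : pvClosed d m (price - d) = price - d := by
          simp only [pvClosed]; rw [if_neg h2, if_pos h3]
        have hkd : price - k * d = price - d := by rw [hk1]; ring
        have hR : pvClosed d m price = price - d := by
          simp only [pvClosed]
          rw [← hkdef, if_neg (by omega), if_neg (by omega), if_neg hm0, hkd, if_pos (by omega)]
        rw [hL, hR]
      · have hk' : -(PySem.Int.floordiv (m - (price - d)) d) = k - 1 := by
          have h := (PySem.Int.neg_floordiv_neg_eq_iff_of_pos
            (a := (price - d) - m) (b := d) (q := k - 1) hd)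
          have hbr : (k - 1 - 1) * d < (price - d) - m ∧ (price - d) - m ≤ (k - 1) * d := by
            constructor
            · nlinarith [hk.1]
            · nlinarith [hk.2]
          have := h.2 hbr
          rwa [show -((price - d) - m) = m - (price - d) by ring] at this
        have e : price - d - (k - 1) * d = price - k * d := by ring
        have hL : pvClosed d m (price - d) =
            if price - k * d > 0 then price - k * d else 0 := by
          simp only [pvClosed]
          rw [if_neg h2, if_neg h3, if_neg hm0, hk', e]
        have hR : pvClosed d m price =
            if price - k * d > 0 then price - k * d else 0 := by
          simp only [pvClosed]
          rw [← hkdef, if_neg (by omega), if_neg (by omega), if_neg hm0]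
        rw [hL, hR]

theorem pvLoop_closed (d : Int) (hd : 0 < d) (bids : List Int) (m : Int)
    (hm : ∀ p : Int, 0 < p → (pvAnyGE bids p = true ↔ p ≤ m)) :
    ∀ (fuel : Nat) (price : Int), price ≤ (fuel : Int) →
      pvALoop d bids fuel price = pvClosed d m price := by
  intro fuel
  induction fuel with
  | zero =>
    intro price hle
    have h0 : price ≤ 0 := by exact_mod_cast hle
    simp only [pvALoop, pvClosed]
    rw [if_pos h0]
  | succ fuel ih =>
    intro price hle
    simp only [pvALoop]
    by_cases hpos : price > 0
    · rw [if_pos hpos]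
      by_cases hany : pvAnyGE bids price = true
      · rw [if_pos hany]
        have hpm : price ≤ m := (hm price hpos).1 hany
        simp only [pvClosed]
        rw [if_neg (by omega), if_pos (by omega)]
      · rw [if_neg hany]
        have hmp : m < price := by
          by_contra h
          exact hany ((hm price hpos).2 (le_of_not_gt h))
        have hrec : pvALoop d bids fuel (price - d) = pvClosed d m (price - d) := by
          apply ih
          have : price ≤ (fuel : Int) + 1 := by push_cast at hle; omega
          omega
        rw [hrec, pvClosed_step d hd m price hpos hmp]
    · rw [if_neg hpos]
      simp only [pvClosed]
      rw [if_pos (by omega)]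

theorem pvAlt_eq_closed (s d : Int) (bids : List Int) :
    dutch_auction_price_alt s d bids =
      pvClosed d ((PySem.List.max? bids (fun x => x)).getD 0) s := by
  simp only [dutch_auction_price_alt, pvClosed]

theorem pvMax_anyGE (bids : List Int) :
    ∀ p : Int, 0 < p →
      (pvAnyGE bids p = true ↔ p ≤ (PySem.List.max? bids (fun x => x)).getD 0) := by
  intro p hp
  rw [pvAnyGE_iff]
  cases hmx : PySem.List.max? bids (fun x => x) with
  | none =>
    have : bids = [] := (PySem.List.max?_eq_none_iff bids _).1 hmx
    subst this
    simp
    omega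
  | some m =>
    have hmem : m ∈ bids := PySem.List.max?_mem hmx
    have hmax : ∀ y ∈ bids, y ≤ m := PySem.List.max?_isMax hmx
    simp only [Option.getD_some]
    constructor
    · rintro ⟨b, hb, hpb⟩
      exact le_trans hpb (hmax b hb)
    · intro hpm
      exact ⟨m, hmem, hpm⟩

-- ===== VERDICT (by name: the statement is the Claim_ definition above) =====
theorem dutch_auction_price_spec : Claim_equal_dutch_auction_price := by
  intro s d bids _hdom hpre
  unfold Spec_dutch_auction_price dutch_auction_price
  by_cases hs : s ≤ 0
  · -- price ≤ 0 immediately: both return 0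
    simp only [pvALoop]
    rw [if_neg (by omega)]
    simp [dutch_auction_price_alt, hs]
  · by_cases hbid : ∃ b ∈ bids, s ≤ b
    · -- some bid already meets the start price: A returns in the first iteration
      have hany : pvAnyGE bids s = true := (pvAnyGE_iff bids s).2 hbid
      have hm : s ≤ (PySem.List.max? bids (fun x => x)).getD 0 :=
        (pvMax_anyGE bids s (by omega)).1 hany
      simp only [pvALoop]
      rw [if_pos (by omega), if_pos hany]
      simp only [dutch_auction_price_alt]
      rw [if_neg (by omega), if_pos (by simpa using hm)]
    · -- no bid meets the start price: Pre_ gives 0 < d, use the loop lemma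
      have hd : 0 < d := by
        rcases hpre with h | h | h
        · omega
        · exact h
        · exact absurd h hbid
      rw [pvLoop_closed d hd bids _ (pvMax_anyGE bids) (s.toNat + 1) s
        (by push_cast; omega)]
      exact (pvAlt_eq_closed s d bids).symm
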